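-- pv_equiv track=rewrite | github.com/b-kuch/advent-of-code-2023 | py_src/d3.py | find_symbols
-- ===== SOURCE A (Python) =====
-- from itertools import chain, cycle
-- from typing import Iterable, Iterator
--
-- def tripletwise(iterable: Iterable):
--     if iterable is None:
--         return cycle([None])
--     a, b, c = chain([None], iterable), iterable, chain(iterable[1:], [None])
--     return zip(a, b, c)
--
-- symbols = '=-@%/+&$*#'
--
-- def find_symbols(prev: str, curr: str, nxt: str) -> Iterator[tuple[str, bool]]:
--     for window in zip(tripletwise(prev), tripletwise(curr), tripletwise(nxt)):
--         current = window[1][1]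
--         symbol_in_window = False
--         for line in window:
--             if line is not None:
--                 for char in line:
--                     if char is not None and char in symbols:
--                         symbol_in_window = True
--         yield current, symbol_in_window
-- ===== SOURCE B (Python) =====
-- symbols = '=-@%/+&$*#'
--
-- def find_symbols(prev, curr, nxt):
--     lines = [l for l in (prev, curr, nxt) if l is not None]
--     n = min(len(l) for l in lines)
--     cols = {j for l in lines for j, ch in enumerate(l) if ch in symbols}
--     for i in range(n):
--         yield curr[i], any(j in cols for j in (i - 1, i, i + 1))
-- ===== Notes on version B (the rewrite author's own statement) =====
-- stated objective: simpler
-- what changed: Instead of zipping three per-line triplet streams and rescanning every 3-char window, B builds one set of symbol column indices per input once and answers each position by three set-membership queries; None lines are simply absent from the index, replacing A's infinite cycle([None]) streams.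
import Mathlib
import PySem

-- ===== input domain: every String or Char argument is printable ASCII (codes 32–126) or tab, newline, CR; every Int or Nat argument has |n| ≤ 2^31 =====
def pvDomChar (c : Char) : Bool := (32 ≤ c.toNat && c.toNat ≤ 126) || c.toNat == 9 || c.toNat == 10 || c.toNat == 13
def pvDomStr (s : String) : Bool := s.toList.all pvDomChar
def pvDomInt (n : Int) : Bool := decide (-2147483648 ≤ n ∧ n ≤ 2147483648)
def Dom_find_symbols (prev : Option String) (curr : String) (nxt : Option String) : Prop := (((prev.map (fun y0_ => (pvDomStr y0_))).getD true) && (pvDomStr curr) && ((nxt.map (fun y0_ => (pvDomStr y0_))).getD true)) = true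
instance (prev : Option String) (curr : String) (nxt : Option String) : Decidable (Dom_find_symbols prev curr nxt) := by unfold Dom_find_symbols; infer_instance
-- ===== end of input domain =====

-- ===== PORT A =====
-- B replaces A's zip of three triplet-window streams by one precomputed set of symbol
-- column indices queried at i-1, i, i+1 per position (objective: simpler); return value only:
-- A yields lazily.
-- ===== PORT A =====
-- A yields lazily; both ports materialise the (finite on String curr) stream as a list.
def pvSymbols : List Char := "=-@%/+&$*#".toList

-- tripletwise of a (non-None) line: (char to the left or None, char, char to the right or None)
def pvTrip (s : List Char) : List (Option Char × Char × Option Char) :=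
  List.zipWith (fun a bc => (a, bc.1, bc.2))
    (none :: s.map some)
    (List.zip s ((s.drop 1).map some ++ [none]))

-- zip of the three tripletwise streams; a None line is cycle([None]) (infinite), never bounding the zip
def pvZipTrips : Option (List (Option Char × Char × Option Char)) →
    List (Option Char × Char × Option Char) →
    Option (List (Option Char × Char × Option Char)) →
    List (Option (Option Char × Char × Option Char) ×
          (Option Char × Char × Option Char) ×
          Option (Option Char × Char × Option Char))
  | _, [], _ => []
  | some [], _ :: _, _ => []
  | _, _ :: _, some [] => []
  | some (a :: as), x :: bs, some (c :: cs) => (some a, x, some c) :: pvZipTrips (some as) bs (some cs)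
  | some (a :: as), x :: bs, none => (some a, x, none) :: pvZipTrips (some as) bs none
  | none, x :: bs, some (c :: cs) => (none, x, some c) :: pvZipTrips none bs (some cs)
  | none, x :: bs, none => (none, x, none) :: pvZipTrips none bs none

-- 'if char is not None and char in symbols: symbol_in_window = True'
def pvCheckChar (acc : Bool) (ch : Option Char) : Bool :=
  match ch with
  | some c => if pvSymbols.contains c then true else acc
  | none => acc

-- 'if line is not None: for char in line: …'
def pvCheckLine (acc : Bool) (line : Option (Option Char × Char × Option Char)) : Bool :=
  match line with
  | none => acc
  | some (a, b, c) => [a, some b, c].foldl pvCheckChar acc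

def find_symbols (prev : Option String) (curr : String) (nxt : Option String) : List (String × Bool) :=
  (pvZipTrips (prev.map (fun s => pvTrip s.toList)) (pvTrip curr.toList)
      (nxt.map (fun s => pvTrip s.toList))).map
    (fun w => (String.ofList [w.2.1.2.1], [w.1, some w.2.1, w.2.2].foldl pvCheckLine false))

-- ===== PORT B =====
def find_symbols_alt (prev : Option String) (curr : String) (nxt : Option String) : List (String × Bool) :=
  let lines : List (List Char) := ([prev, some curr, nxt].filterMap id).map String.toList
  let n : Nat := (lines.map List.length).min?.getD 0
  let cols : PySem.Set Int :=
    PySem.Set.ofList (lines.flatMap (fun l =>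
      (PySem.List.enumerate l).filterMap (fun p =>
        if pvSymbols.contains p.2 then some p.1 else none)))
  -- 'for i in range(n): yield curr[i], …' : i-th char of curr, i < n ≤ len(curr)
  ((curr.toList.take n).zipIdx).map (fun p =>
    (String.ofList [p.1],
     [(p.2 : Int) - 1, (p.2 : Int), (p.2 : Int) + 1].any (fun j => PySem.Set.contains cols j)))

-- ===== PRECONDITION & SPEC =====
def Spec_find_symbols (prev : Option String) (curr : String) (nxt : Option String) (out : List (String × Bool)) : Prop := out = find_symbols_alt prev curr nxt
instance (prev : Option String) (curr : String) (nxt : Option String) (out : List (String × Bool)) : Decidable (Spec_find_symbols prev curr nxt out) := by unfold Spec_find_symbols; infer_instance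

-- ===== CLAIM (what is proved, stated in full; the proofs are below) =====
def Claim_equal_find_symbols : Prop := ∀ (prev : Option String) (curr : String) (nxt : Option String), Dom_find_symbols prev curr nxt → Spec_find_symbols prev curr nxt (find_symbols prev curr nxt)


-- ===== LEMMAS AND PROOFS =====

-- membership in the symbol list, as a Bool on an optional char (None contributes nothing)
def pvSymO (ch : Option Char) : Bool := (ch.map pvSymbols.contains).getD false

lemma pvCheckChar_eq (acc : Bool) (ch : Option Char) :
    pvCheckChar acc ch = (acc || pvSymO ch) := by
  cases ch with
  | none => simp [pvCheckChar, pvSymO]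
  | some c => by_cases h : pvSymbols.contains c <;> simp [pvCheckChar, pvSymO, h, Bool.or_comm]

-- the window-line check as a single Bool
def pvLineB (line : Option (Option Char × Char × Option Char)) : Bool :=
  match line with
  | none => false
  | some (a, b, c) => pvSymO a || pvSymbols.contains b || pvSymO c

lemma pvCheckLine_eq (acc : Bool) (line : Option (Option Char × Char × Option Char)) :
    pvCheckLine acc line = (acc || pvLineB line) := by
  cases line with
  | none => simp [pvCheckLine, pvLineB]
  | some t =>
      obtain ⟨a, b, c⟩ := t
      simp [pvCheckLine, pvLineB, List.foldl, pvCheckChar_eq, pvSymO, Bool.or_assoc]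

-- the triple pvTrip delivers at index i (defaults only hit out of range)
def pvTrElem (s : List Char) (i : Nat) : Option Char × Char × Option Char :=
  ((if i = 0 then none else some (s.getD (i - 1) ' ')), s.getD i ' ',
   if i + 1 < s.length then some (s.getD (i + 1) ' ') else none)

lemma pvTrip_getElem? (s : List Char) (i : Nat) :
    (pvTrip s)[i]? = if i < s.length then some (pvTrElem s i) else none := by
  rcases Nat.lt_or_ge i s.length with h | h
  · have h1 : i < (none :: s.map some).length := by simp; omega
    have h2 : i < (List.zip s ((s.drop 1).map some ++ [none])).length := by
      simp [List.length_zip]; omega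
    rw [pvTrip, List.getElem?_zipWith]
    rw [List.getElem?_eq_getElem h1, List.getElem?_eq_getElem h2]
    simp only [if_pos h, Option.bind_some, Option.map_some]
    congr 1
    have hz : (List.zip s ((s.drop 1).map some ++ [none]))[i] =
        (s[i], ((s.drop 1).map some ++ [none])[i]'(by simp [List.length_zip] at h2 ⊢; omega)) := by
      exact List.getElem_zip ..
    rw [hz]
    unfold pvTrElem
    refine congrArg₂ (fun x yz => (x, yz)) ?_ (congrArg₂ Prod.mk ?_ ?_)
    · cases i with
      | zero => simp
      | succ j =>
          have hj : j < s.length := by omega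
          simp [List.getD, List.getElem?_eq_getElem hj, hj]
    · simp [List.getD, List.getElem?_eq_getElem h]
    · rcases Nat.lt_or_ge (i + 1) s.length with h3 | h3
      · have h4 : i < ((s.drop 1).map some).length := by simp; omega
        rw [List.getElem_append_left h4]
        have h5 : i < (s.drop 1).length := by simp; omega
        have : i + 1 < s.length := h3
        simp [List.getD, List.getElem?_eq_getElem h3, h3]
      · have h4 : ((s.drop 1).map some).length ≤ i := by simp; omega
        rw [List.getElem_append_right h4]
        simp [h3, Nat.not_lt.mpr h3]
  · have : (pvTrip s).length ≤ i := by
      simp [pvTrip, List.length_zipWith, List.length_zip]; omega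
    simp [List.getElem?_eq_none this, Nat.not_lt.mpr h]

-- element i of the zip of the three streams
def pvOptIdx (a? : Option (List (Option Char × Char × Option Char))) (i : Nat) :
    Option (Option (Option Char × Char × Option Char)) :=
  match a? with
  | none => some none
  | some l => l[i]?.map some

lemma pvZipTrips_getElem? (a? : Option (List (Option Char × Char × Option Char)))
    (b : List (Option Char × Char × Option Char))
    (c? : Option (List (Option Char × Char × Option Char))) (i : Nat) :
    (pvZipTrips a? b c?)[i]? =
      b[i]?.bind (fun x => (pvOptIdx a? i).bind (fun wa =>
        (pvOptIdx c? i).map (fun wc => (wa, x, wc)))) := by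
  induction a?, b, c? using pvZipTrips.induct generalizing i with
  | case1 a? c? => simp [pvZipTrips]
  | case2 x bs c? =>
      cases i <;> simp [pvZipTrips, pvOptIdx]
  | case3 a? x bs ha =>
      cases a? with
      | none => cases i <;> simp [pvZipTrips, pvOptIdx]
      | some l =>
          cases l with
          | nil => exact absurd rfl ha
          | cons a as => cases i <;> simp [pvZipTrips, pvOptIdx]
  | case4 a as x bs c cs ih => cases i <;> simp [pvZipTrips, pvOptIdx, ih]
  | case5 a as x bs ih => cases i <;> simp [pvZipTrips, pvOptIdx, ih]
  | case6 x bs c cs ih => cases i <;> simp [pvZipTrips, pvOptIdx, ih]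
  | case7 x bs ih => cases i <;> simp [pvZipTrips, pvOptIdx, ih]


-- B side: the column-set membership, line by line
def pvColB (l : List Char) (j : Int) : Bool :=
  decide (∃ k : Nat, k < l.length ∧ j = (k : Int) ∧ pvSymbols.contains (l.getD k ' ') = true)

lemma pvCols_contains (lines : List (List Char)) (j : Int) :
    PySem.Set.contains (PySem.Set.ofList (lines.flatMap (fun l =>
      (PySem.List.enumerate l).filterMap (fun p =>
        if pvSymbols.contains p.2 then some p.1 else none)))) j
    = lines.any (fun l => pvColB l j) := by
  rw [Bool.eq_iff_iff]
  simp only [PySem.Set.contains_iff, PySem.Set.mem_ofList, List.mem_flatMap,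
    List.mem_filterMap, PySem.List.mem_enumerate_iff, List.any_eq_true, pvColB,
    decide_eq_true_iff]
  constructor
  · rintro ⟨l, hl, p, ⟨k, hk, rfl⟩, hif⟩
    split at hif
    · rename_i hc
      obtain rfl : (0 : Int) + k = j := by exact Option.some.inj hif
      exact ⟨l, hl, k, hk, by omega, by
        simpa [List.getD, List.getElem?_eq_getElem hk] using hc⟩
    · exact absurd hif (by simp)
  · rintro ⟨l, hl, k, hk, rfl, hsym⟩
    refine ⟨l, hl, ((0 : Int) + k, l[k]), ⟨k, hk, rfl⟩, ?_⟩
    rw [if_pos (by simpa [List.getD, List.getElem?_eq_getElem hk] using hsym)]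
    simp

lemma pvColB_self (l : List Char) (i : Nat) (h : i < l.length) :
    pvColB l (i : Int) = pvSymbols.contains (l.getD i ' ') := by
  rw [Bool.eq_iff_iff]
  simp only [pvColB, decide_eq_true_iff]
  constructor
  · rintro ⟨k, hk, hkj, hs⟩
    obtain rfl : k = i := by omega
    exact hs
  · intro hs; exact ⟨i, h, rfl, hs⟩

lemma pvColB_left (l : List Char) (i : Nat) :
    pvColB l ((i : Int) - 1) = (decide (1 ≤ i ∧ i - 1 < l.length) &&
      pvSymbols.contains (l.getD (i - 1) ' ')) := by
  rw [Bool.eq_iff_iff]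
  simp only [pvColB, decide_eq_true_iff, Bool.and_eq_true]
  constructor
  · rintro ⟨k, hk, hkj, hs⟩
    obtain rfl : k = i - 1 := by omega
    exact ⟨⟨by omega, hk⟩, hs⟩
  · rintro ⟨⟨h1, h2⟩, hs⟩
    exact ⟨i - 1, h2, by omega, hs⟩

lemma pvColB_right (l : List Char) (i : Nat) :
    pvColB l ((i : Int) + 1) = (decide (i + 1 < l.length) &&
      pvSymbols.contains (l.getD (i + 1) ' ')) := by
  rw [Bool.eq_iff_iff]
  simp only [pvColB, decide_eq_true_iff, Bool.and_eq_true]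
  constructor
  · rintro ⟨k, hk, hkj, hs⟩
    obtain rfl : k = i + 1 := by omega
    exact ⟨hk, hs⟩
  · rintro ⟨hi, hs⟩
    exact ⟨i + 1, hi, by omega, hs⟩

lemma pvLineB_none : pvLineB none = false := rfl

-- the per-line window check of A, rewritten through the column predicate
lemma pvWindow_eq (l : List Char) (i : Nat) (h : i < l.length) :
    pvLineB (some (pvTrElem l i)) =
      (pvColB l ((i : Int) - 1) || pvColB l (i : Int) || pvColB l ((i : Int) + 1)) := by
  rw [pvColB_self l i h, pvColB_left, pvColB_right]
  simp only [pvLineB, pvTrElem, pvSymO]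
  by_cases h0 : i = 0
  · subst h0
    by_cases h1 : 0 + 1 < l.length <;> simp [h1]
  · have h1 : 1 ≤ i ∧ i - 1 < l.length := ⟨by omega, by omega⟩
    by_cases h2 : i + 1 < l.length <;> simp [h0, h1, h2]

-- ===== VERDICT (by name: the statement is the Claim_ definition above) =====
set_option maxHeartbeats 1000000 in
theorem find_symbols_spec : Claim_equal_find_symbols := by
  intro prev curr nxt _
  unfold Spec_find_symbols
  apply List.ext_getElem?
  intro i
  cases prev with
  | none =>
    cases nxt with
    | none =>
      simp only [find_symbols, find_symbols_alt, List.getElem?_map, pvZipTrips_getElem?,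
        pvTrip_getElem?, pvOptIdx, Option.map_none, Option.map_some, id_eq, List.filterMap_cons,
        List.filterMap_nil, List.map_cons, List.map_nil, List.min?_cons, List.min?_nil,
        List.foldl_cons, List.foldl_nil, Option.elim_none, Option.elim_some, Option.getD_some,
        List.getElem?_take, List.getElem?_zipIdx, Nat.lt_min, Nat.zero_add, Function.comp_apply]
      by_cases hc : i < curr.toList.length
      · simp only [hc, and_true, true_and, ite_true, Option.bind_some, Option.bind_none,
          Option.map_some, Option.map_none, List.getElem?_eq_getElem hc,
          Option.some.injEq, Prod.mk.injEq]
        refine ⟨?_, ?_⟩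
        · simp [pvTrElem, List.getD, List.getElem?_eq_getElem hc]
        · simp only [pvCheckLine_eq, List.foldl_cons, List.foldl_nil, pvLineB_none,
            Bool.false_or, Bool.or_false, pvWindow_eq _ _ hc, pvCols_contains, List.any_cons, List.any_nil]
          rw [Bool.eq_iff_iff]
          simp only [Bool.or_eq_true]
          tauto
      all_goals simp only [hc, and_true, true_and, and_false, false_and, ite_true,
        ite_false, Option.bind_some, Option.bind_none, Option.map_some, Option.map_none]
    | some nq =>
      simp only [find_symbols, find_symbols_alt, List.getElem?_map, pvZipTrips_getElem?,
        pvTrip_getElem?, pvOptIdx, Option.map_none, Option.map_some, id_eq, List.filterMap_cons,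
        List.filterMap_nil, List.map_cons, List.map_nil, List.min?_cons, List.min?_nil,
        List.foldl_cons, List.foldl_nil, Option.elim_none, Option.elim_some, Option.getD_some,
        List.getElem?_take, List.getElem?_zipIdx, Nat.lt_min, Nat.zero_add, Function.comp_apply]
      by_cases hc : i < curr.toList.length <;>
        by_cases hn : i < nq.toList.length
      · simp only [hc, hn, and_true, true_and, ite_true, Option.bind_some, Option.bind_none,
          Option.map_some, Option.map_none, List.getElem?_eq_getElem hc,
          Option.some.injEq, Prod.mk.injEq]
        refine ⟨?_, ?_⟩
        · simp [pvTrElem, List.getD, List.getElem?_eq_getElem hc]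
        · simp only [pvCheckLine_eq, List.foldl_cons, List.foldl_nil, pvLineB_none,
            Bool.false_or, Bool.or_false, pvWindow_eq _ _ hc, pvWindow_eq _ _ hn, pvCols_contains, List.any_cons, List.any_nil]
          rw [Bool.eq_iff_iff]
          simp only [Bool.or_eq_true]
          tauto
      all_goals simp only [hc, hn, and_true, true_and, and_false, false_and, ite_true,
        ite_false, Option.bind_some, Option.bind_none, Option.map_some, Option.map_none]
  | some p =>
    cases nxt with
    | none =>
      simp only [find_symbols, find_symbols_alt, List.getElem?_map, pvZipTrips_getElem?,
        pvTrip_getElem?, pvOptIdx, Option.map_none, Option.map_some, id_eq, List.filterMap_cons,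
        List.filterMap_nil, List.map_cons, List.map_nil, List.min?_cons, List.min?_nil,
        List.foldl_cons, List.foldl_nil, Option.elim_none, Option.elim_some, Option.getD_some,
        List.getElem?_take, List.getElem?_zipIdx, Nat.lt_min, Nat.zero_add, Function.comp_apply]
      by_cases hc : i < curr.toList.length <;>
        by_cases hp : i < p.toList.length
      · simp only [hc, hp, and_true, true_and, ite_true, Option.bind_some, Option.bind_none,
          Option.map_some, Option.map_none, List.getElem?_eq_getElem hc,
          Option.some.injEq, Prod.mk.injEq]
        refine ⟨?_, ?_⟩
        · simp [pvTrElem, List.getD, List.getElem?_eq_getElem hc]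
        · simp only [pvCheckLine_eq, List.foldl_cons, List.foldl_nil, pvLineB_none,
            Bool.false_or, Bool.or_false, pvWindow_eq _ _ hc, pvWindow_eq _ _ hp, pvCols_contains, List.any_cons, List.any_nil]
          rw [Bool.eq_iff_iff]
          simp only [Bool.or_eq_true]
          tauto
      all_goals simp only [hc, hp, and_true, true_and, and_false, false_and, ite_true,
        ite_false, Option.bind_some, Option.bind_none, Option.map_some, Option.map_none]
    | some nq =>
      simp only [find_symbols, find_symbols_alt, List.getElem?_map, pvZipTrips_getElem?,
        pvTrip_getElem?, pvOptIdx, Option.map_none, Option.map_some, id_eq, List.filterMap_cons,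
        List.filterMap_nil, List.map_cons, List.map_nil, List.min?_cons, List.min?_nil,
        List.foldl_cons, List.foldl_nil, Option.elim_none, Option.elim_some, Option.getD_some,
        List.getElem?_take, List.getElem?_zipIdx, Nat.lt_min, Nat.zero_add, Function.comp_apply]
      by_cases hc : i < curr.toList.length <;>
        by_cases hp : i < p.toList.length <;>
        by_cases hn : i < nq.toList.length
      · simp only [hc, hp, hn, and_true, true_and, ite_true, Option.bind_some, Option.bind_none,
          Option.map_some, Option.map_none, List.getElem?_eq_getElem hc,
          Option.some.injEq, Prod.mk.injEq]
        refine ⟨?_, ?_⟩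
        · simp [pvTrElem, List.getD, List.getElem?_eq_getElem hc]
        · simp only [pvCheckLine_eq, List.foldl_cons, List.foldl_nil, pvLineB_none,
            Bool.false_or, Bool.or_false, pvWindow_eq _ _ hc, pvWindow_eq _ _ hp, pvWindow_eq _ _ hn, pvCols_contains, List.any_cons, List.any_nil]
          rw [Bool.eq_iff_iff]
          simp only [Bool.or_eq_true]
          tauto
      all_goals simp only [hc, hp, hn, and_true, true_and, and_false, false_and, ite_true,
        ite_false, Option.bind_some, Option.bind_none, Option.map_some, Option.map_none]
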